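-- pv_equiv track=rewrite | github.com/Ublyudok-kun/reversi | deshacerJugadas.py | deshacer_superior_derecha
-- ===== SOURCE A (Python) =====
-- def deshacer_superior_derecha(tablero, x, y, xf, yf, turno, dimension):
--     if ((x > 0 and x < dimension) and (y >= 0 and y < dimension)):
--         try:
--             # arriba der
--             if ((x > xf+1) and (yf-1 > y)):
--                 tablero[x-1][y+1] = turno*-1
--                 deshacer_superior_derecha(tablero, x-1, y+1, xf, yf, turno, dimension)
--             else:
--                 return tablero
--         except:
--             IndexError
--     return tablero
-- ===== SOURCE B (Python) =====
-- def deshacer_superior_derecha(tablero, x, y, xf, yf, turno, dimension):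
--     # Iterative re-implementation: one while loop with the merged guard,
--     # catching only the IndexError the assignment can raise.
--     # Mutates tablero in place, exactly like the recursive original.
--     cur_x, cur_y = x, y
--     while (0 < cur_x < dimension and 0 <= cur_y < dimension
--            and cur_x > xf + 1 and cur_y < yf - 1):
--         try:
--             tablero[cur_x - 1][cur_y + 1] = -turno
--         except IndexError:
--             break
--         cur_x, cur_y = cur_x - 1, cur_y + 1
--     return tablero
-- ===== Notes on version B (the rewrite author's own statement) =====
-- stated objective: simpler
-- what changed: Replaces the self-recursive function (nested ifs, bare except swallowing everything) with a single iterative while loop whose guard merges the bounds and flip conditions, catching only the IndexError the assignment can raise.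
import Mathlib
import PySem

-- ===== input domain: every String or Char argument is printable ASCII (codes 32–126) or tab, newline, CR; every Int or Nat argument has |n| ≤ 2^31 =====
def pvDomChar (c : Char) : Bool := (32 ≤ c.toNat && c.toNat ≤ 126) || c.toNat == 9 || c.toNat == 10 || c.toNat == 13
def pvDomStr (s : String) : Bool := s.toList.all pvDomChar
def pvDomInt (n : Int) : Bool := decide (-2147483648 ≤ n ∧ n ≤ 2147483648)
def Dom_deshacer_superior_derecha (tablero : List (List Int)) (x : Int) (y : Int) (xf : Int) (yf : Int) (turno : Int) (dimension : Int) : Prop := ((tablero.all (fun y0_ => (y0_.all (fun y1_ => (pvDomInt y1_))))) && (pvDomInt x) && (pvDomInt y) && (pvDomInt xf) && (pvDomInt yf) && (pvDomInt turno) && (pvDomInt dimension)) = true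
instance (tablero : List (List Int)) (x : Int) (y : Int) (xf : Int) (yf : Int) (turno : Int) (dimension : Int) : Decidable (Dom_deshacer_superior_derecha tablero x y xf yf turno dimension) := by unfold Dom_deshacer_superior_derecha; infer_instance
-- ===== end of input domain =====

-- B replaces A's self-recursion (nested ifs, bare except) with one while loop with a
-- merged guard; both mutate tablero in place identically, the equivalence proved is
-- about the returned board (which is the mutated board in both).

-- ===== PORT A =====
-- A's recursion: bounds guard, then flip guard; 'tablero[x-1][y+1] = turno*-1' reads
-- the row (IndexError → caught by the bare except → return tablero) then sets the cell
-- (same); on success the mutated board is threaded into the recursive call.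
def deshacer_superior_derecha (tablero : List (List Int)) (x : Int) (y : Int) (xf : Int) (yf : Int) (turno : Int) (dimension : Int) : List (List Int) :=
  if _h : 0 < x ∧ x < dimension ∧ 0 ≤ y ∧ y < dimension then
    if xf + 1 < x ∧ y < yf - 1 then
      match PySem.List.pyGet? tablero (x - 1) with
      | none => tablero
      | some row =>
        match PySem.List.pySet? row (y + 1) (turno * -1) with
        | none => tablero
        | some row' =>
          deshacer_superior_derecha (PySem.List.pySetD tablero (x - 1) row') (x - 1) (y + 1) xf yf turno dimension
    else tablero
  else tablero
termination_by x.toNat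
decreasing_by omega

-- ===== PORT B =====
-- B's loop body: 'tablero[cur_x-1][cur_y+1] = -turno' as one Option-chained step
-- (none = the IndexError B catches, which breaks the loop).
def pvAltStep (tablero : List (List Int)) (cx : Int) (cy : Int) (v : Int) : Option (List (List Int)) :=
  (PySem.List.pyGet? tablero (cx - 1)).bind fun row =>
    (PySem.List.pySet? row (cy + 1) v).map fun row' =>
      PySem.List.pySetD tablero (cx - 1) row'

-- the while loop over (cur_x, cur_y) with the merged guard
def pvAltLoop (tablero : List (List Int)) (cx : Int) (cy : Int) (xf : Int) (yf : Int) (turno : Int) (dimension : Int) : List (List Int) :=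
  if _h : 0 < cx ∧ cx < dimension ∧ 0 ≤ cy ∧ cy < dimension ∧ xf + 1 < cx ∧ cy < yf - 1 then
    match pvAltStep tablero cx cy (-turno) with
    | none => tablero
    | some t' => pvAltLoop t' (cx - 1) (cy + 1) xf yf turno dimension
  else tablero
termination_by cx.toNat
decreasing_by omega

def deshacer_superior_derecha_alt (tablero : List (List Int)) (x : Int) (y : Int) (xf : Int) (yf : Int) (turno : Int) (dimension : Int) : List (List Int) :=
  pvAltLoop tablero x y xf yf turno dimension

-- ===== PRECONDITION & SPEC =====
def Spec_deshacer_superior_derecha (tablero : List (List Int)) (x : Int) (y : Int) (xf : Int) (yf : Int) (turno : Int) (dimension : Int) (out : List (List Int)) : Prop := out = deshacer_superior_derecha_alt tablero x y xf yf turno dimension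
instance (tablero : List (List Int)) (x : Int) (y : Int) (xf : Int) (yf : Int) (turno : Int) (dimension : Int) (out : List (List Int)) : Decidable (Spec_deshacer_superior_derecha tablero x y xf yf turno dimension out) := by unfold Spec_deshacer_superior_derecha; infer_instance

-- ===== CLAIM (what is proved, stated in full; the proofs are below) =====
def Claim_equal_deshacer_superior_derecha : Prop := ∀ (tablero : List (List Int)) (x : Int) (y : Int) (xf : Int) (yf : Int) (turno : Int) (dimension : Int), Dom_deshacer_superior_derecha tablero x y xf yf turno dimension → Spec_deshacer_superior_derecha tablero x y xf yf turno dimension (deshacer_superior_derecha tablero x y xf yf turno dimension)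

-- ===== LEMMAS AND PROOFS =====

theorem pv_eq (tablero : List (List Int)) (x y xf yf turno dimension : Int) :
    deshacer_superior_derecha tablero x y xf yf turno dimension
      = pvAltLoop tablero x y xf yf turno dimension := by
  fun_induction deshacer_superior_derecha tablero x y xf yf turno dimension with
  | case1 t x y hb hf hrow =>
    rw [pvAltLoop, dif_pos (by exact ⟨hb.1, hb.2.1, hb.2.2.1, hb.2.2.2, hf.1, hf.2⟩)]
    simp [pvAltStep, hrow]
  | case2 t x y hb hf row hrow hset =>
    rw [pvAltLoop, dif_pos (by exact ⟨hb.1, hb.2.1, hb.2.2.1, hb.2.2.2, hf.1, hf.2⟩)]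
    have e : turno * -1 = -turno := by ring
    rw [e] at hset
    simp [pvAltStep, hrow, hset]
  | case3 t x y hb hf row hrow row' hset ih =>
    rw [pvAltLoop, dif_pos (by exact ⟨hb.1, hb.2.1, hb.2.2.1, hb.2.2.2, hf.1, hf.2⟩)]
    have e : turno * -1 = -turno := by ring
    rw [e] at hset
    simp only [pvAltStep, hrow, hset, Option.bind_some, Option.map_some]
    exact ih
  | case4 t x y hb hf =>
    rw [pvAltLoop, dif_neg (by tauto)]
  | case5 t x y hb =>
    rw [pvAltLoop, dif_neg (by tauto)]

-- ===== VERDICT (by name: the statement is the Claim_ definition above) =====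
theorem deshacer_superior_derecha_spec : Claim_equal_deshacer_superior_derecha := by
  intro t x y xf yf turno dim _
  unfold Spec_deshacer_superior_derecha deshacer_superior_derecha_alt
  exact pv_eq t x y xf yf turno dim
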